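-- pv_equiv track=rewrite | github.com/va64doman/codility | Challenges/spooktober.py | stacksOfCoins
-- ===== SOURCE A (Python) =====
-- def calc(A):
--     coins = 0
--     pref = []
--     for a in A:
--         pref.append(coins)
--         coins = (coins + a) // 2
--     return pref
--     pass
--
-- def stacksOfCoins(A):
--     ans = 0
--     le = calc(A)
--     ri = calc(A[::-1])[::-1]
--     for i in range(len(A)):
--         coins = le[i] + A[i] + ri[i]
--         ans = max(ans, coins)
--     return ans
--     pass
-- ===== SOURCE B (Python) =====
-- def stacksOfCoins(A):
--     # Closed form: the iterated halving (c + a) // 2 starting from 0 over a block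
--     # equals a single floor division of a binary-weighted sum, so each index's
--     # left and right contributions are one floordiv of running weighted sums.
--     n = len(A)
--     T = 0
--     for j in range(n):
--         T += A[j] * 2 ** (n - 1 - j)
--     best = 0
--     P = 0
--     R = T
--     for i in range(n):
--         R -= A[i] * 2 ** (n - 1 - i)
--         best = max(best, P // 2 ** i + A[i] + R // 2 ** (n - 1 - i))
--         P += A[i] * 2 ** i
--     return best
-- ===== Notes on version B (the rewrite author's own statement) =====
-- stated objective: alternative
-- what changed: Replaces the iterated-halving prefix/suffix arrays with a closed form: each side's chain of (c+a)//2 steps equals one floor division of a binary-weighted running sum, so B maintains big-integer weighted sums P and R and does a single // 2**k per index, with no calc helper, no prefix lists and no reversals.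
import Mathlib
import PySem

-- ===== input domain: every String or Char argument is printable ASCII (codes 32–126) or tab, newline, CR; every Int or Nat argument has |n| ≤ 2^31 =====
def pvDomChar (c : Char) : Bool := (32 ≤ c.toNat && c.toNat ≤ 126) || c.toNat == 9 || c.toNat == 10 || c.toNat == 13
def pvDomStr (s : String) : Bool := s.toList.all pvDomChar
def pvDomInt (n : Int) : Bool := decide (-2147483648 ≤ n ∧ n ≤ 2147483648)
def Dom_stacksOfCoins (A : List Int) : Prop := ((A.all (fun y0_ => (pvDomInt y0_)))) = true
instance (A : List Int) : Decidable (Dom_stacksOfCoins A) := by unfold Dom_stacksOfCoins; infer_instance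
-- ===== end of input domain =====

-- B replaces the iterated-halving prefix/suffix arrays with a closed form: each chain of
-- (c + a) // 2 steps is one floor division of a binary-weighted running sum (objective: alternative).

-- ===== PORT A =====
-- Python's calc: state (coins, pref); pref.append(coins) then coins = (coins + a) // 2
def pvCalc (A : List Int) : List Int :=
  (A.foldl (fun (st : Int × List Int) a =>
      (PySem.Int.floordiv (st.1 + a) 2, st.2 ++ [st.1])) (0, [])).2

-- A[::-1] is ported as List.reverse (exact for a full step -1 slice)
def stacksOfCoins (A : List Int) : Int :=
  let le := pvCalc A
  let ri := (pvCalc A.reverse).reverse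
  (PySem.List.pyRange 0 (A.length : Int) 1).foldl
    (fun ans i =>
      max ans (PySem.List.pyGetD le i 0 + PySem.List.pyGetD A i 0 + PySem.List.pyGetD ri i 0)) 0

-- ===== PORT B =====
-- Source B: first loop sums A[j] * 2**(n-1-j) into T; second loop keeps (best, P, R) and at
-- each i subtracts A[i]'s weight from R, maximizes P // 2**i + A[i] + R // 2**(n-1-i),
-- then adds A[i] * 2**i to P.  Python's 2 ** k is ported as 2 ^ k.toNat, exact here
-- because every exponent n-1-j, i in the loops is nonnegative.
def stacksOfCoins_alt (A : List Int) : Int :=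
  let n : Int := (A.length : Int)
  let T : Int := (PySem.List.pyRange 0 n 1).foldl
    (fun T j => T + PySem.List.pyGetD A j 0 * 2 ^ (n - 1 - j).toNat) 0
  let st := (PySem.List.pyRange 0 n 1).foldl
    (fun (st : Int × Int × Int) i =>
      let R := st.2.2 - PySem.List.pyGetD A i 0 * 2 ^ (n - 1 - i).toNat
      (max st.1 (PySem.Int.floordiv st.2.1 (2 ^ i.toNat) + PySem.List.pyGetD A i 0
          + PySem.Int.floordiv R (2 ^ (n - 1 - i).toNat)),
       st.2.1 + PySem.List.pyGetD A i 0 * 2 ^ i.toNat, R))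
    (0, 0, T)
  st.1

-- ===== PRECONDITION & SPEC =====
def Spec_stacksOfCoins (A : List Int) (out : Int) : Prop := out = stacksOfCoins_alt A
instance (A : List Int) (out : Int) : Decidable (Spec_stacksOfCoins A out) := by unfold Spec_stacksOfCoins; infer_instance

-- ===== CLAIM (what is proved, stated in full; the proofs are below) =====
def Claim_equal_stacksOfCoins : Prop := ∀ (A : List Int), Dom_stacksOfCoins A → Spec_stacksOfCoins A (stacksOfCoins A)

-- ===== LEMMAS AND PROOFS =====

-- the list of prefix accumulator values produced by Python's calc
def prefList (c : Int) : List Int → List Int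
  | [] => []
  | a :: t => c :: prefList (PySem.Int.floordiv (c + a) 2) t

-- right accumulator of a suffix: fold from the right
def rc (xs : List Int) : Int := xs.foldr (fun a r => PySem.Int.floordiv (r + a) 2) 0

-- left accumulator from c over xs
def lcFrom (c : Int) (xs : List Int) : Int := xs.foldl (fun r a => PySem.Int.floordiv (r + a) 2) c

-- the list of per-index totals le[i] + A[i] + ri[i], generated structurally
def totals (c : Int) : List Int → List Int
  | [] => []
  | a :: t => (c + a + rc t) :: totals (PySem.Int.floordiv (c + a) 2) t

-- binary-weighted sums: wle has weight 2^j at index j, wri has weight 2^(len-1-j)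
def wle : List Int → Int
  | [] => 0
  | a :: t => a + 2 * wle t

def wri : List Int → Int
  | [] => 0
  | a :: t => a * 2 ^ t.length + wri t

theorem calc_foldl_eq (xs : List Int) : ∀ (c : Int) (acc : List Int),
    (xs.foldl (fun (st : Int × List Int) a =>
      (PySem.Int.floordiv (st.1 + a) 2, st.2 ++ [st.1])) (c, acc)).2 = acc ++ prefList c xs := by
  induction xs with
  | nil => intro c acc; simp [prefList]
  | cons a t ih =>
    intro c acc
    simp only [List.foldl_cons]
    rw [ih]
    simp [prefList]

theorem pvCalc_eq (A : List Int) : pvCalc A = prefList 0 A := by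
  unfold pvCalc
  rw [calc_foldl_eq A 0 []]
  simp

theorem length_prefList (xs : List Int) : ∀ c, (prefList c xs).length = xs.length := by
  induction xs with
  | nil => intro c; rfl
  | cons a t ih => intro c; simp [prefList, ih]

theorem length_totals (xs : List Int) : ∀ c, (totals c xs).length = xs.length := by
  induction xs with
  | nil => intro c; rfl
  | cons a t ih => intro c; simp [totals, ih]

theorem lcFrom_cons (c a : Int) (l : List Int) :
    lcFrom c (a :: l) = lcFrom (PySem.Int.floordiv (c + a) 2) l := rfl

theorem getD_prefList (xs : List Int) : ∀ (c : Int) (i : Nat), i < xs.length →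
    (prefList c xs).getD i 0 = lcFrom c (xs.take i) := by
  induction xs with
  | nil => intro c i h; simp at h
  | cons a t ih =>
    intro c i h
    cases i with
    | zero => simp [prefList, lcFrom]
    | succ j =>
      have h' : j < t.length := by simpa using h
      rw [List.take_succ_cons, lcFrom_cons, ← ih _ j h']
      simp [prefList]

theorem getD_totals (xs : List Int) : ∀ (c : Int) (i : Nat), i < xs.length →
    (totals c xs).getD i 0
      = lcFrom c (xs.take i) + xs.getD i 0 + rc (xs.drop (i + 1)) := by
  induction xs with
  | nil => intro c i h; simp at h
  | cons a t ih =>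
    intro c i h
    cases i with
    | zero => simp [totals, lcFrom]
    | succ j =>
      have h' : j < t.length := by simpa using h
      rw [List.take_succ_cons, lcFrom_cons, List.drop_succ_cons, List.getD_cons_succ, ← ih _ j h']
      simp [totals]

-- used by A_eq_foldl_totals: ri[i] equals the right accumulator of the suffix after i
theorem rc_eq_reverse_fold (ys : List Int) : lcFrom 0 ys.reverse = rc ys := by
  simp [lcFrom, rc, List.foldl_reverse]

theorem getD_ri (A : List Int) (i : Nat) (h : i < A.length) :
    ((prefList 0 A.reverse).reverse).getD i 0 = rc (A.drop (i + 1)) := by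
  have hlen : (prefList 0 A.reverse).length = A.length := by
    rw [length_prefList]; simp
  have h1 : i < (prefList 0 A.reverse).reverse.length := by simpa [hlen] using h
  rw [List.getD_eq_getElem _ _ h1, List.getElem_reverse]
  have h2 : (prefList 0 A.reverse).length - 1 - i < A.reverse.length := by
    simp [hlen]; omega
  rw [← List.getD_eq_getElem _ 0 (by simpa [hlen] using h2),
    getD_prefList _ _ _ (by simpa using h2)]
  have htake : A.reverse.take ((prefList 0 A.reverse).length - 1 - i)
      = (A.drop (i + 1)).reverse := by
    rw [hlen, List.take_reverse, List.reverse_inj]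
    congr 1
    omega
  rw [htake, rc_eq_reverse_fold]

theorem A_eq_foldl_totals (A : List Int) :
    stacksOfCoins A = (totals 0 A).foldl max 0 := by
  unfold stacksOfCoins
  rw [pvCalc_eq, pvCalc_eq, PySem.List.pyRange_zero_natCast]
  rw [List.foldl_map]
  have hmap : (List.range A.length).map (fun k =>
      (prefList 0 A).getD k 0 + A.getD k 0 + ((prefList 0 A.reverse).reverse).getD k 0)
      = totals 0 A := by
    apply List.ext_getElem
    · simp [length_totals]
    · intro i h1 h2
      have hi : i < A.length := by simpa using h1
      simp only [List.getElem_map, List.getElem_range]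
      rw [getD_prefList _ _ _ hi, getD_ri _ _ hi,
        ← List.getD_eq_getElem _ 0 h2, getD_totals _ _ _ hi]
  rw [← hmap, List.foldl_map]
  simp

-- closed form for one halving step stacked on a power-of-two floor division
theorem fdiv_fdiv_two (x : Int) (k : Nat) :
    PySem.Int.floordiv (PySem.Int.floordiv x (2 ^ k)) 2 = PySem.Int.floordiv x (2 ^ (k + 1)) := by
  show (x.fdiv (2 ^ k)).fdiv 2 = x.fdiv (2 ^ (k + 1))
  rw [Int.fdiv_fdiv_eq_fdiv_mul _ (by positivity) (by norm_num), pow_succ]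

theorem fdiv_add_mul (x a : Int) (k : Nat) :
    PySem.Int.floordiv x (2 ^ k) + a = PySem.Int.floordiv (x + a * 2 ^ k) (2 ^ k) := by
  show x.fdiv (2 ^ k) + a = (x + a * 2 ^ k).fdiv (2 ^ k)
  rw [Int.add_mul_fdiv_right _ _ (by positivity)]

-- the left accumulator chain is one floor division of the weighted sum
theorem lcFrom_closed (xs : List Int) : ∀ c : Int,
    lcFrom c xs = PySem.Int.floordiv (c + wle xs) (2 ^ xs.length) := by
  induction xs with
  | nil =>
    intro c
    show c = PySem.Int.floordiv (c + 0) 1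
    simp [PySem.Int.floordiv, Int.fdiv_one]
  | cons a t ih =>
    intro c
    rw [lcFrom_cons, ih]
    have h1 : PySem.Int.floordiv (c + a) 2 + wle t
        = PySem.Int.floordiv (c + a + wle t * 2) 2 := by
      simpa using fdiv_add_mul (c + a) (wle t) 1
    rw [h1]
    show PySem.Int.floordiv _ _ = _
    rw [show ((2:Int) ^ (a :: t).length) = 2 * 2 ^ t.length by
      simp [List.length_cons, pow_succ]; ring]
    show (((c + a + wle t * 2).fdiv 2).fdiv (2 ^ t.length)) = (c + wle (a :: t)).fdiv (2 * 2 ^ t.length)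
    rw [Int.fdiv_fdiv_eq_fdiv_mul _ (by norm_num) (by positivity)]
    have : c + a + wle t * 2 = c + wle (a :: t) := by simp [wle]; ring
    rw [this, mul_comm (2:Int) (2 ^ t.length)]

-- the right accumulator chain is one floor division of the weighted sum
theorem rc_closed (xs : List Int) :
    rc xs = PySem.Int.floordiv (wri xs) (2 ^ xs.length) := by
  induction xs with
  | nil => simp [rc, wri, PySem.Int.floordiv, Int.fdiv_one]
  | cons a t ih =>
    show PySem.Int.floordiv (rc t + a) 2 = _
    rw [ih, fdiv_add_mul (wri t) a t.length, fdiv_fdiv_two]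
    simp only [wri, List.length_cons]
    ring_nf

theorem wle_append_singleton (xs : List Int) : ∀ a : Int,
    wle (xs ++ [a]) = wle xs + a * 2 ^ xs.length := by
  induction xs with
  | nil => intro a; simp [wle]
  | cons b t ih =>
    intro a
    simp only [List.cons_append, wle, ih, List.length_cons, pow_succ]
    ring

theorem wri_drop (A : List Int) (k : Nat) (hk : k < A.length) :
    wri (A.drop k) = A.getD k 0 * 2 ^ (A.length - 1 - k) + wri (A.drop (k + 1)) := by
  have hd : A.drop k = A[k] :: A.drop (k + 1) := List.drop_eq_getElem_cons hk
  rw [hd]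
  simp only [wri, List.length_drop]
  rw [List.getD_eq_getElem _ 0 hk, show A.length - (k + 1) = A.length - 1 - k from by omega]

-- the first loop of B computes the full right-weighted sum
theorem T_loop_eq (A : List Int) : ∀ k : Nat, k ≤ A.length →
    (List.range k).foldl
      (fun T j => T + A.getD j 0 * 2 ^ (A.length - 1 - j)) 0
      = wri A - wri (A.drop k) := by
  intro k
  induction k with
  | zero => intro _; simp
  | succ m ih =>
    intro hm
    rw [List.range_succ, List.foldl_append, List.foldl_cons, List.foldl_nil,
      ih (by omega), wri_drop A m (by omega)]
    ring

-- invariant of B's main loop: best = max of the totals so far, P and R are the weighted sums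
theorem B_loop_inv (A : List Int) : ∀ k : Nat, k ≤ A.length →
    (List.range k).foldl
      (fun (st : Int × Int × Int) i =>
        let R := st.2.2 - A.getD i 0 * 2 ^ (A.length - 1 - i)
        (max st.1 (PySem.Int.floordiv st.2.1 (2 ^ i) + A.getD i 0
            + PySem.Int.floordiv R (2 ^ (A.length - 1 - i))),
         st.2.1 + A.getD i 0 * 2 ^ i, R))
      (0, 0, wri A)
      = ((List.range k).foldl (fun b i => max b ((totals 0 A).getD i 0)) 0,
         wle (A.take k), wri (A.drop k)) := by
  intro k
  induction k with
  | zero => intro _; simp [wle]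
  | succ m ih =>
    intro hm
    have hm' : m < A.length := by omega
    rw [List.range_succ, List.foldl_append, List.foldl_append, List.foldl_cons, List.foldl_nil,
      List.foldl_cons, List.foldl_nil, ih (by omega)]
    have hR : wri (A.drop m) - A.getD m 0 * 2 ^ (A.length - 1 - m) = wri (A.drop (m + 1)) := by
      rw [wri_drop A m hm']; ring
    have hP : wle (A.take m) + A.getD m 0 * 2 ^ m = wle (A.take (m + 1)) := by
      rw [List.take_add_one, List.getElem?_eq_getElem hm']
      simp only [Option.toList_some]
      rw [wle_append_singleton, List.length_take, Nat.min_eq_left (le_of_lt hm'),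
        List.getD_eq_getElem _ 0 hm']
    have htot : PySem.Int.floordiv (wle (A.take m)) (2 ^ m) + A.getD m 0
        + PySem.Int.floordiv (wri (A.drop (m + 1))) (2 ^ (A.length - 1 - m))
        = (totals 0 A).getD m 0 := by
      rw [getD_totals A 0 m hm', lcFrom_closed, rc_closed]
      have h1 : (A.take m).length = m := by simp [Nat.min_eq_left (le_of_lt hm')]
      have h2 : (A.drop (m + 1)).length = A.length - 1 - m := by simp; omega
      rw [h1, h2]
      simp
    simp only [hR, hP, htot]

-- B equals the fold of max over the same per-index totals as A
theorem B_eq_foldl_totals (A : List Int) :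
    stacksOfCoins_alt A = (totals 0 A).foldl max 0 := by
  simp only [stacksOfCoins_alt]
  rw [PySem.List.pyRange_zero_natCast, List.foldl_map, List.foldl_map]
  have hexp : ∀ j : Nat, ((A.length : Int) - 1 - (j : Int)).toNat = A.length - 1 - j := by
    intro j; omega
  have hfunT : (fun (T : Int) (j : Nat) => T + PySem.List.pyGetD A (j : Int) 0
        * 2 ^ (((A.length : Int)) - 1 - (j : Int)).toNat)
      = (fun (T : Int) (j : Nat) => T + A.getD j 0 * 2 ^ (A.length - 1 - j)) := by
    funext T j
    simp [hexp j]
  have hT := T_loop_eq A A.length (le_refl _)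
  simp only [List.drop_length, wri, sub_zero] at hT
  rw [hfunT, hT]
  have := B_loop_inv A A.length (le_refl _)
  have hfun : (fun (st : Int × Int × Int) (i : Nat) =>
      let R := st.2.2 - PySem.List.pyGetD A (i : Int) 0 * 2 ^ (((A.length : Int)) - 1 - (i : Int)).toNat
      (max st.1 (PySem.Int.floordiv st.2.1 (2 ^ ((i : Int)).toNat) + PySem.List.pyGetD A (i : Int) 0
          + PySem.Int.floordiv R (2 ^ (((A.length : Int)) - 1 - (i : Int)).toNat)),
       st.2.1 + PySem.List.pyGetD A (i : Int) 0 * 2 ^ ((i : Int)).toNat, R))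
      = (fun (st : Int × Int × Int) (i : Nat) =>
        let R := st.2.2 - A.getD i 0 * 2 ^ (A.length - 1 - i)
        (max st.1 (PySem.Int.floordiv st.2.1 (2 ^ i) + A.getD i 0
            + PySem.Int.floordiv R (2 ^ (A.length - 1 - i))),
         st.2.1 + A.getD i 0 * 2 ^ i, R)) := by
    funext st i
    simp [hexp i]
  rw [hfun, this]
  -- fold of max over getD at indices range (length) = fold over the list itself
  have : (List.range A.length).foldl (fun b i => max b ((totals 0 A).getD i 0)) 0
      = (totals 0 A).foldl max 0 := by
    rw [← List.foldl_map]
    congr 1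
    apply List.ext_getElem
    · simp [length_totals]
    · intro i h1 h2
      simp only [List.getElem_map, List.getElem_range]
      rw [← List.getD_eq_getElem _ 0 h2]
  exact this


-- ===== VERDICT (by name: the statement is the Claim_ definition above) =====
theorem stacksOfCoins_spec : Claim_equal_stacksOfCoins := by
  intro A _
  unfold Spec_stacksOfCoins
  rw [A_eq_foldl_totals, B_eq_foldl_totals]
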